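-- pv_equiv track=rewrite | github.com/dev-team-404/slea-ssem | src/backend/services/adaptive_difficulty_service.py | get_category_priority_ratio
-- ===== SOURCE A (Python) =====
-- def get_category_priority_ratio(
--     wrong_categories: dict[str, int], total_questions: int = 5
-- ) -> dict[str, float]:
--     """
--     Calculate how many questions should be from weak categories.
--
--     REQ: REQ-B-B2-Adapt-3 (≥50% from weak categories)
--
--     For 5 total questions:
--     - If 1 weak category with 2 wrong: allocate ≥3 questions (60%)
--     - If 2 weak categories with 2+2 wrong: allocate ≥3 questions (60%) total
--
--     Args:
--         wrong_categories: Categories with wrong counts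
--         total_questions: Total questions in Round 2 (default 5)
--
--     Returns:
--         Dictionary: {category -> count} for how many questions to ask
--         Example: {"LLM": 3, "RAG": 2}
--
--     """
--     if not wrong_categories:
--         # No weak categories: use balanced distribution
--         return {}
--
--     # Calculate minimum questions needed to satisfy ≥50% from weak categories
--     min_weak_questions = max(3, (total_questions + 1) // 2)  # Ensures ≥50%
--
--     # Total weak categories
--     total_weak_cats = len(wrong_categories)
--
--     # Distribute weak questions fairly among weak categories
--     allocation: dict[str, float] = {}
--     remaining = min_weak_questions
--
--     for idx, (cat, _count) in enumerate(wrong_categories.items()):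
--         # Give each weak category roughly equal share
--         cats_left = total_weak_cats - idx
--         questions_for_this_cat = remaining // cats_left
--         allocation[cat] = questions_for_this_cat
--         remaining -= questions_for_this_cat
--
--     return allocation
-- ===== SOURCE B (Python) =====
-- def get_category_priority_ratio(
--     wrong_categories: dict[str, int], total_questions: int = 5
-- ) -> dict[str, float]:
--     """Closed-form fair split: base share for everyone, the remainder goes
--     to the trailing categories (same result as the running-subtraction loop)."""
--     if not wrong_categories:
--         return {}
--     min_weak_questions = max(3, (total_questions + 1) // 2)
--     k = len(wrong_categories)
--     base, rem = divmod(min_weak_questions, k)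
--     return {
--         cat: base + (1 if idx >= k - rem else 0)
--         for idx, cat in enumerate(wrong_categories)
--     }
-- ===== Notes on version B (the rewrite author's own statement) =====
-- stated objective: simpler
-- what changed: Replaces the running-subtraction loop (remaining //= cats_left each step) with one upfront divmod and a per-index closed form base + (1 if idx >= k - rem else 0); the Lean Pre_ only excludes association lists with duplicate keys, which cannot arise from a Python dict argument.
import Mathlib
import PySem

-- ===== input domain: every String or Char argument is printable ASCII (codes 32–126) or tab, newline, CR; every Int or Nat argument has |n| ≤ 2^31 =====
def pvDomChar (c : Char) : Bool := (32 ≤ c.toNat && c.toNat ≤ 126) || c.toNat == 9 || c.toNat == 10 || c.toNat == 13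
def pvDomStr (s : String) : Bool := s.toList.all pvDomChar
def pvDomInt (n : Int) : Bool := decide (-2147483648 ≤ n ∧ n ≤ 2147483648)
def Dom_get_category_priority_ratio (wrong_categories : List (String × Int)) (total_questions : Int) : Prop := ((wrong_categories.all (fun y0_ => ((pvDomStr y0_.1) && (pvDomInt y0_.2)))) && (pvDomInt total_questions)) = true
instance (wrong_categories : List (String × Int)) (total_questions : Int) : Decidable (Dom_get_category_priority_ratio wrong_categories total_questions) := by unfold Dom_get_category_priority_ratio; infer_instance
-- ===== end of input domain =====

-- B replaces A's running-subtraction loop by one upfront divmod and a per-index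
-- closed form (objective: simpler); equal output on every duplicate-free input.

-- ===== PORT A =====
def get_category_priority_ratio (wrong_categories : List (String × Int)) (total_questions : Int) : List (String × Int) :=
  if wrong_categories = [] then []
  else
    let min_weak_questions := max 3 (PySem.Int.floordiv (total_questions + 1) 2)
    let total_weak_cats : Int := wrong_categories.length
    let final := (PySem.List.enumerate wrong_categories).foldl
      (fun (st : PySem.Dict String Int × Int) p =>
        let cats_left := total_weak_cats - p.1
        let questions_for_this_cat := PySem.Int.floordiv st.2 cats_left
        (st.1.insert p.2.1 questions_for_this_cat, st.2 - questions_for_this_cat))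
      (PySem.Dict.empty, min_weak_questions)
    final.1.items

-- ===== PORT B =====
def get_category_priority_ratio_alt (wrong_categories : List (String × Int)) (total_questions : Int) : List (String × Int) :=
  if wrong_categories = [] then []
  else
    let min_weak_questions := max 3 (PySem.Int.floordiv (total_questions + 1) 2)
    let k : Int := wrong_categories.length
    let base := PySem.Int.floordiv min_weak_questions k
    let rem := PySem.Int.mod min_weak_questions k
    (PySem.List.enumerate wrong_categories).map
      (fun p => (p.2.1, base + if k - rem ≤ p.1 then 1 else 0))

-- ===== PRECONDITION & SPEC =====
-- Pre_ excludes association lists with duplicate keys: a Python dict argument can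
-- never contain them, and A's dict overwrite-in-place behaviour there is not
-- reproducible by a list traversal.
def Pre_get_category_priority_ratio (wrong_categories : List (String × Int)) (_total_questions : Int) : Prop :=
  (wrong_categories.map Prod.fst).Nodup
instance (wrong_categories : List (String × Int)) (total_questions : Int) : Decidable (Pre_get_category_priority_ratio wrong_categories total_questions) := by unfold Pre_get_category_priority_ratio; infer_instance

def pvWitness_get_category_priority_ratio : (List (String × Int)) × Int := ([("LLM", 2), ("RAG", 2)], 5)

def Spec_get_category_priority_ratio (wrong_categories : List (String × Int)) (total_questions : Int) (out : List (String × Int)) : Prop := out = get_category_priority_ratio_alt wrong_categories total_questions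
instance (wrong_categories : List (String × Int)) (total_questions : Int) (out : List (String × Int)) : Decidable (Spec_get_category_priority_ratio wrong_categories total_questions out) := by unfold Spec_get_category_priority_ratio; infer_instance

-- ===== CLAIM (what is proved, stated in full; the proofs are below) =====
def Claim_equal_get_category_priority_ratio : Prop := ∀ (wrong_categories : List (String × Int)) (total_questions : Int), Dom_get_category_priority_ratio wrong_categories total_questions → Pre_get_category_priority_ratio wrong_categories total_questions → Spec_get_category_priority_ratio wrong_categories total_questions (get_category_priority_ratio wrong_categories total_questions)

-- ===== LEMMAS AND PROOFS =====

-- Loop invariant: with r = base*(k-i) + min rem (k-i) questions remaining before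
-- index i, A's step hands out exactly base (+1 for the trailing rem indices) and
-- re-establishes the invariant.
theorem pv_loop_items (base rem k : Int) (hrem : 0 ≤ rem) (_hremk : rem < k) :
    ∀ (l : List (String × Int)) (i : Int) (d : PySem.Dict String Int) (r : Int),
      i + l.length = k →
      r = base * (k - i) + min rem (k - i) →
      (∀ p ∈ l, d.contains p.1 = false) →
      (l.map Prod.fst).Nodup →
      ((PySem.List.enumerate l i).foldl
        (fun (st : PySem.Dict String Int × Int) p =>
          (st.1.insert p.2.1 (PySem.Int.floordiv st.2 (k - p.1)),
           st.2 - PySem.Int.floordiv st.2 (k - p.1))) (d, r)).1.items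
      = d.items ++ (PySem.List.enumerate l i).map
          (fun p => (p.2.1, base + if k - rem ≤ p.1 then 1 else 0)) := by
  intro l
  induction l with
  | nil => intro i d r _ _ _ _; simp [PySem.List.enumerate_nil]
  | cons x t ih =>
    intro i d r hk hr hfresh hnodup
    have hc : (0:Int) < k - i := by
      have := hk; simp at this; omega
    have hq : PySem.Int.floordiv r (k - i) = base + if k - rem ≤ i then 1 else 0 := by
      rw [PySem.Int.floordiv_eq_ediv_of_pos hc, hr]
      by_cases h : k - rem ≤ i
      · have hmin : min rem (k - i) = k - i := by omega
        rw [hmin, if_pos h]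
        have : base * (k - i) + (k - i) = (base + 1) * (k - i) := by ring
        rw [this, Int.mul_ediv_cancel _ (by omega)]
      · have hmin : min rem (k - i) = rem := by omega
        rw [hmin, if_neg h]
        have : base * (k - i) + rem = rem + base * (k - i) := by ring
        rw [this, Int.add_mul_ediv_right _ _ (by omega : k - i ≠ 0),
            Int.ediv_eq_zero_of_lt hrem (by omega)]
        ring
    rw [PySem.List.enumerate_cons]
    simp only [List.foldl_cons]
    rw [ih (i + 1) _ _ (by simp at hk ⊢; omega)
      (by
        rw [hq]
        by_cases h : k - rem ≤ i
        · have hmin : min rem (k - (i+1)) = k - (i+1) := by omega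
          have hmul : base * (k - i) = base * (k - (i+1)) + base := by ring
          rw [if_pos h, hmin]; omega
        · have hmin : min rem (k - (i+1)) = rem := by omega
          have hmul : base * (k - i) = base * (k - (i+1)) + base := by ring
          rw [if_neg h, hmin]; omega)
      (by
        intro p hp
        rw [PySem.Dict.contains_insert]
        have h1 : d.contains p.1 = false := hfresh p (List.mem_cons_of_mem _ hp)
        have h2 : p.1 ≠ x.1 := by
          simp only [List.map_cons, List.nodup_cons] at hnodup
          intro he
          exact hnodup.1 (he ▸ List.mem_map_of_mem hp)
        simp [h1, h2])
      (by simp only [List.map_cons, List.nodup_cons] at hnodup; exact hnodup.2)]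
    rw [PySem.Dict.items_insert_of_not_contains _ _ (hfresh x (List.mem_cons_self))]
    simp [hq]

theorem get_category_priority_ratio_eq_alt (wc : List (String × Int)) (tq : Int)
    (h : (wc.map Prod.fst).Nodup) :
    get_category_priority_ratio wc tq = get_category_priority_ratio_alt wc tq := by
  unfold get_category_priority_ratio get_category_priority_ratio_alt
  by_cases he : wc = []
  · simp [he]
  · simp only [if_neg he]
    set m := max 3 (PySem.Int.floordiv (tq + 1) 2) with hm
    set k : Int := (wc.length : Int) with hk
    have hkpos : (0:Int) < k := by
      rw [hk]; exact_mod_cast List.length_pos_of_ne_nil he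
    have hrem0 : 0 ≤ PySem.Int.mod m k := PySem.Int.mod_nonneg _ hkpos
    have hremk : PySem.Int.mod m k < k := PySem.Int.mod_lt _ hkpos
    have hsplit : m = PySem.Int.floordiv m k * (k - 0) + min (PySem.Int.mod m k) (k - 0) := by
      have := PySem.Int.floordiv_mul_add_mod m k
      have hmin : min (PySem.Int.mod m k) k = PySem.Int.mod m k := by omega
      simp only [sub_zero, hmin]; omega
    have := pv_loop_items (PySem.Int.floordiv m k) (PySem.Int.mod m k) k hrem0 hremk
      wc 0 PySem.Dict.empty m (by rw [hk]; simp) hsplit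
      (by intro p _; exact PySem.Dict.contains_empty _) h
    simpa using this

-- ===== VERDICT (by name: the statement is the Claim_ definition above) =====
theorem get_category_priority_ratio_spec : Claim_equal_get_category_priority_ratio := by
  intro wc tq _ hpre
  unfold Spec_get_category_priority_ratio
  exact get_category_priority_ratio_eq_alt wc tq hpre
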